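-- pv_equiv track=rewrite | github.com/SebastianKlemkosky/School-Projects | Programming Languages/HW4/CompleteFunctions/mmm.py | mmm
-- ===== SOURCE A (Python) =====
-- def mmm(args):
--   smallPos = 100000000
--   largeNeg = -100000000
--   for arg in args:
--     n = int(arg)
--     if(smallPos > n and n > 0):
--       smallPos = n
--     if(largeNeg < n and n < 0):
--       largeNeg = n
--   return (smallPos, largeNeg)
-- ===== SOURCE B (Python) =====
-- def mmm(args):
--   positives = [int(arg) for arg in args if int(arg) > 0]
--   negatives = [int(arg) for arg in args if int(arg) < 0]
--   smallPos = min(positives + [100000000])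
--   largeNeg = max(negatives + [-100000000])
--   return (smallPos, largeNeg)
-- ===== Notes on version B (the rewrite author's own statement) =====
-- stated objective: simpler
-- what changed: Replaces the single accumulator loop with two sign-filtered lists reduced by builtin min/max, with the sentinel appended to the list so the original's cap at +/-100000000 is preserved.
import Mathlib
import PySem

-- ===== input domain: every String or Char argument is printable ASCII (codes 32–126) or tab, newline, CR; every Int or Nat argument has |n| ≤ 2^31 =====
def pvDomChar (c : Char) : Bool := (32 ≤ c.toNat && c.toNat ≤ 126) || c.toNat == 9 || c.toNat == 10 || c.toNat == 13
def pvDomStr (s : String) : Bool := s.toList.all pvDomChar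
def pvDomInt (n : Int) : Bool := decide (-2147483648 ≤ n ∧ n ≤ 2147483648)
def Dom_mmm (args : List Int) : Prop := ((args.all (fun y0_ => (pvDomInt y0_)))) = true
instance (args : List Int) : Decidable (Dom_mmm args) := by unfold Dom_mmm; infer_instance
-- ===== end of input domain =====

-- B replaces A's single accumulator loop by two sign-filtered lists reduced with min/max
-- (sentinel appended so the ±100000000 cap is preserved): simpler decomposition, same cost.


-- ===== PORT A =====
def mmm (args : List Int) : Int × Int :=
  args.foldl
    (fun (st : Int × Int) n =>
      (if st.1 > n ∧ n > 0 then n else st.1,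
       if st.2 < n ∧ n < 0 then n else st.2))
    (100000000, -100000000)

-- ===== PORT B =====
def mmm_alt (args : List Int) : Int × Int :=
  let positives := args.filter (fun n => decide (n > 0))
  let negatives := args.filter (fun n => decide (n < 0))
  (((PySem.List.min? (positives ++ [100000000]) (fun x => x)).getD 0),
   ((PySem.List.max? (negatives ++ [-100000000]) (fun x => x)).getD 0))

-- ===== PRECONDITION & SPEC =====
def Spec_mmm (args : List Int) (out : Int × Int) : Prop := out = mmm_alt args
instance (args : List Int) (out : Int × Int) : Decidable (Spec_mmm args out) := by unfold Spec_mmm; infer_instance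

-- ===== CLAIM (what is proved, stated in full; the proofs are below) =====
def Claim_equal_mmm : Prop := ∀ (args : List Int), Dom_mmm args → Spec_mmm args (mmm args)

-- ===== LEMMAS AND PROOFS =====

-- A's pair fold splits into two independent folds
theorem foldl_pair_split (args : List Int) (f g : Int → Int → Int) (s l : Int) :
    args.foldl (fun (st : Int × Int) n => (f st.1 n, g st.2 n)) (s, l)
      = (args.foldl f s, args.foldl g l) := by
  induction args generalizing s l with
  | nil => rfl
  | cons n t ih => simpa using ih (f s n) (g l n)

theorem foldl_min_pull (t : List Int) (a b : Int) :
    min (t.foldl min a) b = t.foldl min (min b a) := by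
  induction t generalizing a with
  | nil => simp [min_comm]
  | cons c t ih =>
      simp only [List.foldl_cons]
      rw [ih (min a c)]
      congr 1
      exact (min_assoc b a c).symm

theorem foldl_max_pull (t : List Int) (a b : Int) :
    max (t.foldl max a) b = t.foldl max (max b a) := by
  induction t generalizing a with
  | nil => simp [max_comm]
  | cons c t ih =>
      simp only [List.foldl_cons]
      rw [ih (max a c)]
      congr 1
      exact (max_assoc b a c).symm

-- min? of (l ++ [S]) is the running-min loop started at S
theorem min?_append_sentinel (l : List Int) (S : Int) :
    (PySem.List.min? (l ++ [S]) (fun x => x)).getD 0 = l.foldl min S := by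
  cases l with
  | nil => simp [PySem.List.min?_id_cons]
  | cons x t =>
      rw [List.cons_append, PySem.List.min?_id_cons]
      simp only [Option.getD_some, List.foldl_append, List.foldl_cons, List.foldl_nil]
      rw [foldl_min_pull t x S]

theorem max?_append_sentinel (l : List Int) (S : Int) :
    (PySem.List.max? (l ++ [S]) (fun x => x)).getD 0 = l.foldl max S := by
  cases l with
  | nil => simp [PySem.List.max?_id_cons]
  | cons x t =>
      rw [List.cons_append, PySem.List.max?_id_cons]
      simp only [Option.getD_some, List.foldl_append, List.foldl_cons, List.foldl_nil]
      rw [foldl_max_pull t x S]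

-- A's conditional update over all args = running min over the positive elements
theorem foldA_pos (args : List Int) (s : Int) :
    args.foldl (fun a n => if a > n ∧ n > 0 then n else a) s
      = (args.filter (fun n => decide (n > 0))).foldl min s := by
  induction args generalizing s with
  | nil => rfl
  | cons n t ih =>
      by_cases h : n > 0
      · have hstep : (if s > n ∧ n > 0 then n else s) = min s n := by
          by_cases hs : s > n
          · rw [if_pos ⟨hs, h⟩]; omega
          · rw [if_neg (by tauto)]; omega
        rw [List.foldl_cons, hstep, ih]
        simp [h]
      · rw [List.foldl_cons, if_neg (by tauto), ih]
        simp [h]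

theorem foldA_neg (args : List Int) (l : Int) :
    args.foldl (fun a n => if a < n ∧ n < 0 then n else a) l
      = (args.filter (fun n => decide (n < 0))).foldl max l := by
  induction args generalizing l with
  | nil => rfl
  | cons n t ih =>
      by_cases h : n < 0
      · have hstep : (if l < n ∧ n < 0 then n else l) = max l n := by
          by_cases hl : l < n
          · rw [if_pos ⟨hl, h⟩]; omega
          · rw [if_neg (by tauto)]; omega
        rw [List.foldl_cons, hstep, ih]
        simp [h]
      · rw [List.foldl_cons, if_neg (by tauto), ih]
        simp [h]

-- ===== VERDICT (by name: the statement is the Claim_ definition above) =====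
theorem mmm_spec : Claim_equal_mmm := by
  intro args _
  unfold Spec_mmm mmm mmm_alt
  rw [foldl_pair_split args (fun a n => if a > n ∧ n > 0 then n else a)
        (fun a n => if a < n ∧ n < 0 then n else a) 100000000 (-100000000),
      foldA_pos, foldA_neg, ← min?_append_sentinel, ← max?_append_sentinel]
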